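-- pv_equiv track=rewrite | github.com/kivvilol/CPSC-242 | Classwork/exam1_work.py | int_has_789
-- ===== SOURCE A (Python) =====
-- def int_has_789(minput):
--
--     str_input = str(minput)
--
--     i = 0
--
--     has_seven = False
--     has_eight = False
--     has_nine = False
--
--     while i < len(str_input):
--
--         if str_input[i] == '7':
--
--             has_seven = True
--
--         elif str_input[i] == '8':
--
--             has_eight = True
--
--         elif str_input[i] == '9':
--
--             has_nine = True
--
--         i += 1
--
--     if has_seven and has_eight and has_nine:
--
--         return True
--
--     return False
-- ===== SOURCE B (Python) =====
-- def int_has_789(minput):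
--     n = abs(minput)
--     digits = []
--     while n:
--         n, d = divmod(n, 10)
--         digits.append(d)
--     return 7 in digits and 8 in digits and 9 in digits
-- ===== Notes on version B (the rewrite author's own statement) =====
-- stated objective: alternative
-- what changed: Replaced the string scan with three boolean flags by pure arithmetic: repeatedly divmod the absolute value by 10 to extract the numeric digits into a list, then test membership of 7, 8 and 9 -- no str() conversion at all.
import Mathlib
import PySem

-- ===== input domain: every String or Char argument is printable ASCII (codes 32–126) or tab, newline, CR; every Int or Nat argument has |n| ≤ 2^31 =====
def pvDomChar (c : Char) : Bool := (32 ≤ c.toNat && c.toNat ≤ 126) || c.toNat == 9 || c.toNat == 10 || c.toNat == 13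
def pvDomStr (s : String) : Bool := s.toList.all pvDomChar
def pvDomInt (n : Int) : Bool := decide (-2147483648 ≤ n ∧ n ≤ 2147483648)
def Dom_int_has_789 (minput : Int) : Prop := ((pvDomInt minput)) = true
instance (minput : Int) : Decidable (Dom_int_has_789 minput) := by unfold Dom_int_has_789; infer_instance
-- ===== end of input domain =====

-- B drops the string conversion entirely: it extracts the numeric digits of |minput|
-- by repeated divmod by 10 into a list and tests membership of 7, 8 and 9 (alternative).

-- ===== PORT A =====
-- the while loop scans str_input character by character, updating three flags
def int_has_789_loop (cs : List Char) (hasSeven hasEight hasNine : Bool) : Bool × Bool × Bool :=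
  match cs with
  | [] => (hasSeven, hasEight, hasNine)
  | c :: rest =>
    if c = '7' then int_has_789_loop rest true hasEight hasNine
    else if c = '8' then int_has_789_loop rest hasSeven true hasNine
    else if c = '9' then int_has_789_loop rest hasSeven hasEight true
    else int_has_789_loop rest hasSeven hasEight hasNine

def int_has_789 (minput : Int) : Bool :=
  let strInput := PySem.Int.toStr minput
  let (hasSeven, hasEight, hasNine) := int_has_789_loop strInput.toList false false false
  if hasSeven && hasEight && hasNine then true else false

-- ===== PORT B =====
-- the while loop: while n: n, d = divmod(n, 10); digits.append(d)
def int_has_789_digitLoop (n : Nat) (digits : List Nat) : List Nat :=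
  if h : n = 0 then digits
  else int_has_789_digitLoop (n / 10) (digits ++ [n % 10])
decreasing_by exact Nat.div_lt_self (Nat.pos_of_ne_zero h) (by norm_num)

def int_has_789_alt (minput : Int) : Bool :=
  let n := minput.natAbs                    -- abs(minput)
  let digits := int_has_789_digitLoop n []
  decide (7 ∈ digits) && decide (8 ∈ digits) && decide (9 ∈ digits)

-- ===== PRECONDITION & SPEC =====
def Spec_int_has_789 (minput : Int) (out : Bool) : Prop := out = int_has_789_alt minput
instance (minput : Int) (out : Bool) : Decidable (Spec_int_has_789 minput out) := by unfold Spec_int_has_789; infer_instance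

-- ===== CLAIM (what is proved, stated in full; the proofs are below) =====
def Claim_equal_int_has_789 : Prop := ∀ (minput : Int), Dom_int_has_789 minput → Spec_int_has_789 minput (int_has_789 minput)

-- ===== LEMMAS AND PROOFS =====

-- A's loop sets each flag iff the corresponding character occurs
theorem int_has_789_loop_spec (cs : List Char) (s e n : Bool) :
    int_has_789_loop cs s e n =
      (s || decide ('7' ∈ cs), e || decide ('8' ∈ cs), n || decide ('9' ∈ cs)) := by
  induction cs generalizing s e n with
  | nil => simp [int_has_789_loop]
  | cons c rest ih =>
    simp only [int_has_789_loop]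
    split_ifs with h7 h8 h9 <;> rw [ih] <;> clear ih <;> simp_all [List.mem_cons, eq_comm]

-- the least-significant-first digit list of m (B's loop, accumulator removed)
def pvRevD (m : Nat) : List Nat :=
  if h : m = 0 then [] else m % 10 :: pvRevD (m / 10)
decreasing_by exact Nat.div_lt_self (Nat.pos_of_ne_zero h) (by norm_num)

theorem digitLoop_eq : ∀ m l, int_has_789_digitLoop m l = l ++ pvRevD m := by
  intro m
  induction m using Nat.strong_induction_on with
  | _ m ih =>
    intro l
    rw [int_has_789_digitLoop, pvRevD]
    split_ifs with h
    · simp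
    · rw [ih (m / 10) (Nat.div_lt_self (Nat.pos_of_ne_zero h) (by norm_num))]
      simp

-- the character list produced by Nat.toDigitsCore, accumulator removed
def pvRevC (m : Nat) : List Char :=
  if h : m / 10 = 0 then [Nat.digitChar (m % 10)]
  else pvRevC (m / 10) ++ [Nat.digitChar (m % 10)]
decreasing_by
  exact Nat.div_lt_self (Nat.pos_of_ne_zero (fun e => h (by simp [e]))) (by norm_num)

theorem toDigitsCore_eq_pvRevC :
    ∀ (f m : Nat) (l : List Char), m < f →
      Nat.toDigitsCore 10 f m l = pvRevC m ++ l := by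
  intro f
  induction f with
  | zero => intro m l h; omega
  | succ f ih =>
    intro m l h
    rw [Nat.toDigitsCore, pvRevC]
    split_ifs with h10
    · rfl
    · rw [ih (m / 10) _ (by
        have hm : m ≠ 0 := fun e => h10 (by simp [e])
        have := Nat.div_lt_self (Nat.pos_of_ne_zero hm) (show 1 < 10 by norm_num)
        omega)]
      simp

theorem digitChar_eq_iff (r d : Nat) (hr : r < 10) (hd : 7 ≤ d ∧ d ≤ 9) :
    Nat.digitChar r = Nat.digitChar d ↔ r = d := by
  obtain ⟨hd1, hd2⟩ := hd
  interval_cases r <;> interval_cases d <;> decide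

theorem mem_pvRevC_iff (m d : Nat) (hd : 7 ≤ d ∧ d ≤ 9) :
    Nat.digitChar d ∈ pvRevC m ↔ d ∈ pvRevD m := by
  induction m using Nat.strong_induction_on with
  | _ m ih =>
    rw [pvRevC, pvRevD]
    by_cases hm : m = 0
    · subst hm
      simp only [show (0:Nat)/10 = 0 from rfl, show (0:Nat) % 10 = 0 from rfl]
      obtain ⟨hd1, hd2⟩ := hd
      interval_cases d <;> decide
    · have hrd := digitChar_eq_iff (m % 10) d (Nat.mod_lt _ (by norm_num)) hd
      have hrd' : Nat.digitChar d = Nat.digitChar (m % 10) ↔ d = m % 10 := by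
        rw [eq_comm, hrd, eq_comm]
      split_ifs with h10
      · simp [h10, pvRevD, hrd']
      · have hlt : m / 10 < m :=
          Nat.div_lt_self (Nat.pos_of_ne_zero hm) (by norm_num)
        simp [ih (m / 10) hlt, hrd', or_comm]

-- '7'/'8'/'9' occur in str(minput) iff the digit occurs in pvRevD minput.natAbs
theorem mem_toChars_iff (minput : Int) (d : Nat) (hd : 7 ≤ d ∧ d ≤ 9) :
    Nat.digitChar d ∈ PySem.Int.toChars minput ↔ d ∈ pvRevD minput.natAbs := by
  have hdash : Nat.digitChar d ≠ '-' := by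
    obtain ⟨hd1, hd2⟩ := hd; interval_cases d <;> decide
  unfold PySem.Int.toChars Nat.toDigits
  split_ifs with hneg
  · rw [toDigitsCore_eq_pvRevC _ _ _ (Nat.lt_succ_self _)]
    simp [hdash, mem_pvRevC_iff _ _ hd]
  · rw [toDigitsCore_eq_pvRevC _ _ _ (Nat.lt_succ_self _)]
    have htn : minput.toNat = minput.natAbs := by omega
    rw [htn]
    simp [mem_pvRevC_iff _ _ hd]

-- ===== VERDICT (by name: the statement is the Claim_ definition above) =====
theorem int_has_789_spec : Claim_equal_int_has_789 := by
  intro minput _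
  unfold Spec_int_has_789 int_has_789 int_has_789_alt
  simp only [int_has_789_loop_spec, Bool.false_or, digitLoop_eq, List.nil_append,
    PySem.Int.toStr]
  have h7 := mem_toChars_iff minput 7 (by omega)
  have h8 := mem_toChars_iff minput 8 (by omega)
  have h9 := mem_toChars_iff minput 9 (by omega)
  simp only [show Nat.digitChar 7 = '7' from rfl, show Nat.digitChar 8 = '8' from rfl,
    show Nat.digitChar 9 = '9' from rfl] at h7 h8 h9
  rw [Bool.eq_iff_iff]
  simp [String.toList_ofList, h7, h8, h9]
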